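-- pv_equiv track=rewrite | github.com/hackepeter101/werwolf | werwolf.py | rainbow
-- ===== SOURCE A (Python) =====
-- def rainbow(text):
--     """Split by newline first, then color every non-space character in rainbow order."""
--     colors = ["\033[91m", "\033[93m", "\033[92m", "\033[96m", "\033[94m", "\033[95m"]
--     lines = str(text).split("\n")
--     output_lines = []
--
--     for line in lines:
--         color_index = 0
--         colored = []
--         for char in line:
--             if char.isspace():
--                 colored.append(char)
--             else:
--                 colored.append(f"{colors[color_index % len(colors)]}{char}\033[0m")
--             color_index += 1
--         output_lines.append("".join(colored))
--
--     return "\n".join(output_lines)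
-- ===== SOURCE B (Python) =====
-- def rainbow(text):
--     """Two staged passes: first compute each character's colour index (reset at '\n'),
--     then map (char, index) pairs to coloured pieces and join once."""
--     colors = ["\033[91m", "\033[93m", "\033[92m", "\033[96m", "\033[94m", "\033[95m"]
--     s = str(text)
--     idxs = []
--     i = 0
--     for ch in s:
--         idxs.append(0 if ch == "\n" else i)
--         i = 0 if ch == "\n" else i + 1
--     return "".join(
--         ch if ch.isspace() else colors[j % 6] + ch + "\033[0m"
--         for ch, j in zip(s, idxs)
--     )
-- ===== Notes on version B (the rewrite author's own statement) =====
-- stated objective: alternative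
-- what changed: Replaced A's split-on-newline plus nested per-line loop and double join by two staged passes over the flat string: a scan that assigns every character its colour index (resetting at '\n'), then a single map over (char, index) pairs joined once.
import Mathlib
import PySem

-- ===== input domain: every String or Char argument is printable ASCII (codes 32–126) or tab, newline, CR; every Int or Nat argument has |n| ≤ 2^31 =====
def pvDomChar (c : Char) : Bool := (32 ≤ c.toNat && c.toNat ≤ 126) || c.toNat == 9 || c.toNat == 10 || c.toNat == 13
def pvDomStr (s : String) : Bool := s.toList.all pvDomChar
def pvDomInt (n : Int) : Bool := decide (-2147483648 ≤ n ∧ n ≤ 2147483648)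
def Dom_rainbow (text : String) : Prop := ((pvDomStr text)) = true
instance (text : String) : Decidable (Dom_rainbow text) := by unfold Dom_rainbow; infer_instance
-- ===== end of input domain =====

-- B replaces A's split-into-lines + nested per-line loop + double join by two staged
-- passes: a scan assigning colour indices (reset at '\n'), then one map + join
-- (objective: alternative decomposition; same cost).

-- ===== PORT A =====
def pvColors : List (List Char) :=
  [['\x1b','[','9','1','m'], ['\x1b','[','9','3','m'], ['\x1b','[','9','2','m'],
   ['\x1b','[','9','6','m'], ['\x1b','[','9','4','m'], ['\x1b','[','9','5','m']]

def pvReset : List Char := ['\x1b','[','0','m']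

-- inner loop of A over one line: list of appended pieces plus the running color_index
def rainbowLine (line : List Char) : List Char :=
  let r := line.foldl (fun (st : List (List Char) × Int) c =>
    if PySem.Chars.isspace c then (st.1 ++ [[c]], st.2 + 1)
    else (st.1 ++ [PySem.List.pyGetD pvColors (PySem.Int.mod st.2 6) [] ++ [c] ++ pvReset], st.2 + 1))
    ([], 0)
  PySem.Chars.join [] r.1

def rainbow (text : String) : String :=
  String.ofList (PySem.Chars.join ['\n']
    ((PySem.Chars.splitOn text.toList ['\n']).map rainbowLine))

-- ===== PORT B =====
-- first pass of B: the colour index assigned to each character (reset at '\n')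
def pvIdxs : List Char → Int → List Int
  | [], _ => []
  | c :: cs, i => (if c = '\n' then 0 else i) :: pvIdxs cs (if c = '\n' then 0 else i + 1)

def rainbow_alt (text : String) : String :=
  String.ofList (PySem.Chars.join []
    ((text.toList.zip (pvIdxs text.toList 0)).map (fun p =>
      if PySem.Chars.isspace p.1 then [p.1]
      else PySem.List.pyGetD pvColors (PySem.Int.mod p.2 6) [] ++ [p.1] ++ pvReset)))

-- ===== PRECONDITION & SPEC =====
def Spec_rainbow (text : String) (out : String) : Prop := out = rainbow_alt text
instance (text : String) (out : String) : Decidable (Spec_rainbow text out) := by unfold Spec_rainbow; infer_instance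

-- ===== CLAIM (what is proved, stated in full; the proofs are below) =====
def Claim_equal_rainbow : Prop := ∀ (text : String), Dom_rainbow text → Spec_rainbow text (rainbow text)

-- ===== LEMMAS AND PROOFS =====

-- one emitted piece for a character at line position i
def pvPiece (i : Int) (c : Char) : List Char :=
  if PySem.Chars.isspace c then [c]
  else PySem.List.pyGetD pvColors (PySem.Int.mod i 6) [] ++ [c] ++ pvReset

-- recursive form of A's inner loop
def goA : List Char → Int → List Char
  | [], _ => []
  | c :: cs, i => pvPiece i c ++ goA cs (i + 1)

-- the flat pass both sides compute: piece per character, index reset at '\n'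
def goB : List Char → Int → List Char
  | [], _ => []
  | c :: cs, i => if c = '\n' then '\n' :: goB cs 0 else pvPiece i c ++ goB cs (i + 1)

-- structural split on '\n'
def pvSplit : List Char → List (List Char)
  | [] => [[]]
  | c :: cs =>
    if c = '\n' then [] :: pvSplit cs
    else match pvSplit cs with
      | h :: r => (c :: h) :: r
      | [] => [[c]]

lemma pvSplit_ne_nil (s : List Char) : pvSplit s ≠ [] := by
  cases s with
  | nil => simp [pvSplit]
  | cons c cs =>
    simp only [pvSplit]
    split_ifs
    · simp
    · cases h : pvSplit cs <;> simp

lemma join_nil_flatten (parts : List (List Char)) :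
    PySem.Chars.join [] parts = parts.flatten := by
  induction parts with
  | nil => simp [PySem.Chars.join_nil]
  | cons p rest ih =>
    cases rest with
    | nil => simp [PySem.Chars.join_singleton]
    | cons q r => simp [PySem.Chars.join_cons_cons, ih]

lemma joinNL (h : List Char) (r : List (List Char)) :
    PySem.Chars.join ['\n'] (h :: r) = h ++ (r.map (fun l => '\n' :: l)).flatten := by
  induction r generalizing h with
  | nil => simp [PySem.Chars.join_singleton]
  | cons q t ih => simp [PySem.Chars.join_cons_cons, ih q]

-- PySem's fueled splitOn on a one-character separator equals the structural pvSplit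
lemma splitOn_go_eq (s : List Char) : ∀ (fuel : Nat) (cur : List Char) (acc : List (List Char)),
    s.length ≤ fuel →
    PySem.Chars.splitOn.go ['\n'] fuel s cur acc =
      acc.reverse ++ (match pvSplit s with
        | h :: r => (cur.reverse ++ h) :: r
        | [] => []) := by
  induction s with
  | nil =>
    intro fuel cur acc _
    cases fuel <;> simp [PySem.Chars.splitOn.go, pvSplit]
  | cons c cs ih =>
    intro fuel cur acc hf
    cases fuel with
    | zero => simp at hf
    | succ f =>
      simp only [List.length_cons, Nat.succ_le_succ_iff] at hf
      by_cases hc : c = '\n'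
      · subst hc
        have hpre : List.isPrefixOf ['\n'] ('\n' :: cs) = true := by
          simp [List.isPrefixOf]
        simp only [PySem.Chars.splitOn.go, hpre, if_true, List.length_cons,
          List.length_nil, List.drop_succ_cons, List.drop_zero]
        rw [ih f [] (cur.reverse :: acc) hf]
        cases h : pvSplit cs with
        | nil => exact absurd h (pvSplit_ne_nil cs)
        | cons h' r => simp [pvSplit, h]
      · have hpre : List.isPrefixOf ['\n'] (c :: cs) = false := by
          simp only [List.isPrefixOf, Bool.and_eq_false_iff, beq_eq_false_iff_ne, ne_eq]
          exact Or.inl (fun h => hc h.symm)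
        simp only [PySem.Chars.splitOn.go, hpre, Bool.false_eq_true, if_false]
        rw [ih f (c :: cur) acc hf]
        cases h : pvSplit cs with
        | nil => exact absurd h (pvSplit_ne_nil cs)
        | cons h' r => simp [pvSplit, h, hc]

lemma splitOn_eq_pvSplit (s : List Char) :
    PySem.Chars.splitOn s ['\n'] = pvSplit s := by
  show PySem.Chars.splitOn.go ['\n'] (s.length + 1) s [] [] = pvSplit s
  rw [splitOn_go_eq s (s.length + 1) [] [] (by omega)]
  cases h : pvSplit s with
  | nil => exact absurd h (pvSplit_ne_nil s)
  | cons h' r => simp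

-- A's inner foldl loop computes goA
lemma rainbowLine_foldl (line : List Char) :
    ∀ (acc : List (List Char)) (i : Int),
    (line.foldl (fun (st : List (List Char) × Int) c =>
      if PySem.Chars.isspace c then (st.1 ++ [[c]], st.2 + 1)
      else (st.1 ++ [PySem.List.pyGetD pvColors (PySem.Int.mod st.2 6) [] ++ [c] ++ pvReset], st.2 + 1))
      (acc, i)).1.flatten = acc.flatten ++ goA line i := by
  induction line with
  | nil => intro acc i; simp [goA]
  | cons c cs ih =>
    intro acc i
    simp only [List.foldl_cons]
    by_cases hs : PySem.Chars.isspace c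
    · simp only [hs, if_pos, ih, goA, pvPiece]
      simp
    · simp only [hs, Bool.false_eq_true, if_false, ih, goA, pvPiece]
      simp

lemma rainbowLine_eq (line : List Char) : rainbowLine line = goA line 0 := by
  unfold rainbowLine
  rw [join_nil_flatten, rainbowLine_foldl line [] 0]
  simp

-- B's zip-and-map over the precomputed index list computes goB
lemma alt_zip_map (s : List Char) : ∀ (i : Int),
    ((s.zip (pvIdxs s i)).map (fun p =>
      if PySem.Chars.isspace p.1 then [p.1]
      else PySem.List.pyGetD pvColors (PySem.Int.mod p.2 6) [] ++ [p.1] ++ pvReset)).flatten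
      = goB s i := by
  induction s with
  | nil => intro i; simp [pvIdxs, goB]
  | cons c cs ih =>
    intro i
    simp only [pvIdxs, List.zip_cons_cons, List.map_cons, List.flatten_cons, ih]
    by_cases hn : c = '\n'
    · subst hn
      have hs : PySem.Chars.isspace '\n' = true := by decide
      simp [goB, hs]
    · simp [goB, hn, pvPiece]

-- the flat pass equals A's split/colour/join composition, with a running start index
lemma goB_eq_split (s : List Char) : ∀ (i : Int),
    goB s i = (match pvSplit s with
      | h :: r => goA h i ++ (r.map (fun l => '\n' :: goA l 0)).flatten
      | [] => []) := by
  induction s with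
  | nil => intro i; simp [goB, pvSplit, goA]
  | cons c cs ih =>
    intro i
    by_cases hn : c = '\n'
    · subst hn
      simp only [goB, if_pos rfl, ih 0, pvSplit]
      cases h : pvSplit cs with
      | nil => exact absurd h (pvSplit_ne_nil cs)
      | cons h' r => simp [goA]
    · simp only [goB, hn, if_false, ih (i + 1), pvSplit]
      cases h : pvSplit cs with
      | nil => exact absurd h (pvSplit_ne_nil cs)
      | cons h' r => simp [goA]

-- ===== VERDICT (by name: the statement is the Claim_ definition above) =====
theorem rainbow_spec : Claim_equal_rainbow := by
  intro text _
  show rainbow text = rainbow_alt text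
  have hB : rainbow_alt text = String.ofList (goB text.toList 0) := by
    unfold rainbow_alt
    rw [join_nil_flatten, alt_zip_map text.toList 0]
  rw [hB]
  unfold rainbow
  rw [splitOn_eq_pvSplit]
  cases h : pvSplit text.toList with
  | nil => exact absurd h (pvSplit_ne_nil text.toList)
  | cons h' r =>
    simp only [List.map_cons]
    rw [joinNL]
    rw [goB_eq_split text.toList 0, h]
    simp only [List.map_map, Function.comp_def, rainbowLine_eq]
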